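-- pv_equiv track=rewrite | github.com/JevonsAn/draw_topo.old | intergate.py | max_min_ip_in_prefix
-- ===== SOURCE A (Python) =====
-- def ip_dec_to_bin(address):
--     bin_list = ["%08d" % int(bin(int(x))[2:]) for x in address.split(".")]
--     bins = ".".join(bin_list)
--     return bins
--
-- def ip_bin_to_dec(address):
--     dec_list = [str(int(x, 2)) for x in address.split(".")]
--     return ".".join(dec_list)
--
-- def max_min_ip_in_prefix(prefix, length):
--     length = int(length)
--     bin_ip = ip_dec_to_bin(prefix)
--     mx = [x for x in bin_ip]
--     mn = [x for x in bin_ip]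
--     real_l = 0
--     for i, w in enumerate(bin_ip):
--         if w != ".":
--             real_l += 1
--             if real_l > length:
--                 mx[i] = "1"
--                 mn[i] = "0"
--     mx[-1] = "0"
--     mn[-2] = "1"
--     return ip_bin_to_dec("".join(mn)), ip_bin_to_dec("".join(mx))
-- ===== SOURCE B (Python) =====
-- def max_min_ip_in_prefix(prefix, length):
--     length = int(length)
--     vals = [int(p) for p in prefix.split(".")]
--
--     def mask(j):
--         keep = min(8, max(0, length - 8 * j))
--         return (0xFF << (8 - keep)) & 0xFF
--
--     mn = [v & mask(j) for j, v in enumerate(vals)]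
--     mx = [v | (~mask(j) & 0xFF) for j, v in enumerate(vals)]
--     mn[-1] |= 2
--     mx[-1] &= 0xFE
--     return ".".join(map(str, mn)), ".".join(map(str, mx))
-- ===== Notes on version B (the rewrite author's own statement) =====
-- stated objective: idiomatic
-- what changed: B replaces A's binary-string pipeline (decimal->bin-string per octet, a character-flipping scan over the dotted bit string with a running bit counter, string surgery for the two fixed tweaks, then bin-string->decimal) by direct per-octet integer bit arithmetic: each octet is AND-ed/OR-ed with a netmask derived from the prefix length, and the two fixed tweaks become 'mn[-1] |= 2' and 'mx[-1] &= 0xFE'.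
-- outside the precondition, e.g. on max_min_ip_in_prefix('300', 4): A returns ('290', '318'), B returns ('34', '46')
import Mathlib
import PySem

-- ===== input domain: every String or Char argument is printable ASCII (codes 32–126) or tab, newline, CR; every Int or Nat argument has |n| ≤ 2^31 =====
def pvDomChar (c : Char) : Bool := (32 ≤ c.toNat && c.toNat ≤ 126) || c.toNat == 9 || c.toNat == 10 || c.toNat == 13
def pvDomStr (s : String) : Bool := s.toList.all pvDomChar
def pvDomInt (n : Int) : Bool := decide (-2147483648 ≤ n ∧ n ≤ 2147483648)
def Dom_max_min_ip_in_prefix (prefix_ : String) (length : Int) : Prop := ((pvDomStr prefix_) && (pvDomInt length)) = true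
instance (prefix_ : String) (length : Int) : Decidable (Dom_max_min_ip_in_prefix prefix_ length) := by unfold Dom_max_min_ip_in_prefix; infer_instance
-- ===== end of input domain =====

-- B replaces A's binary-string pipeline by per-octet integer bit arithmetic (same return values; no speed claim).

-- ===== PORT A =====

-- Python bin(n): binary digits of n (most significant first); fuel-structural so the kernel reduces it
def binCore : Nat → Nat → List Char
  | 0, _ => []
  | f+1, n => if n = 0 then [] else binCore f (n / 2) ++ [if n % 2 == 1 then '1' else '0']

-- bin(n) as a character list ('0b…' / '-0b…'); exact for every int
def pyBinChars (n : Int) : List Char :=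
  if n < 0 then '-' :: '0' :: 'b' :: (if n.natAbs = 0 then ['0'] else binCore n.natAbs n.natAbs)
  else '0' :: 'b' :: (if n.toNat = 0 then ['0'] else binCore n.toNat n.toNat)

-- ip_dec_to_bin; none = ValueError.  bin(v)[2:] is List.drop 2 (exact: Python s[2:] with a
-- nonnegative index drops min(2, len) chars); "%08d" % m = str(m).zfill(8) (exact for every int m).
def ipDecToBin (address : List Char) : Option (List Char) :=
  ((PySem.Chars.splitOn address ['.']).mapM (fun x =>
      (PySem.Int.ofChars? x).bind (fun v =>
        (PySem.Int.ofChars? (List.drop 2 (pyBinChars v))).map (fun d =>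
          PySem.Chars.zfill (PySem.Int.toChars d) 8)))).map (PySem.Chars.join ['.'])

-- ip_bin_to_dec; none = ValueError from int(x, 2)
def ipBinToDec (address : List Char) : Option (List Char) :=
  ((PySem.Chars.splitOn address ['.']).mapM (fun x =>
      (PySem.Int.ofCharsBase? x 2).map PySem.Int.toChars)).map (PySem.Chars.join ['.'])

-- loop body: state (mx, mn, real_l); the enumerate index i is ≥ 0, so .toNat is exact
def loopBody (length : Int) (st : List Char × List Char × Int) (iw : Int × Char) :
    List Char × List Char × Int :=
  if iw.2 ≠ '.' then
    if st.2.2 + 1 > length then (st.1.set iw.1.toNat '1', st.2.1.set iw.1.toNat '0', st.2.2 + 1)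
    else (st.1, st.2.1, st.2.2 + 1)
  else st

def max_min_ip_in_prefix (prefix_ : String) (length : Int) : String × String :=
  match ipDecToBin prefix_.toList with
  | none => ("", "")   -- Python raises ValueError here (outside Pre_)
  | some bin_ip =>
    let st := (PySem.List.enumerate bin_ip).foldl (loopBody length) (bin_ip, bin_ip, 0)
    -- mx[-1] = "0", mn[-2] = "1": bin_ip here is nonempty (≥ 8 chars), so the negative
    -- indices resolve to len-1 / len-2 and Python's IndexError is unreachable
    let mx := st.1.set (st.1.length - 1) '0'
    let mn := st.2.1.set (st.2.1.length - 2) '1'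
    match ipBinToDec mn, ipBinToDec mx with
    | some a, some b => (String.ofList a, String.ofList b)
    | _, _ => ("", "")   -- unreachable: mn/mx consist of binary digits and dots

-- ===== PORT B =====

-- netmask for octet j: keep = min(8, max(0, length - 8*j)); (0xFF << (8-keep)) & 0xFF
def altMask (length j : Int) : Int :=
  PySem.Int.band (255 <<< (8 - min 8 (max 0 (length - 8 * j))).toNat) 255

def max_min_ip_in_prefix_alt (prefix_ : String) (length : Int) : String × String :=
  match (PySem.Chars.splitOn prefix_.toList ['.']).mapM PySem.Int.ofChars? with
  | none => ("", "")   -- int(p) raises ValueError (outside Pre_)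
  | some vals =>
    let mn := (PySem.List.enumerate vals).map (fun jv => PySem.Int.band jv.2 (altMask length jv.1))
    let mx := (PySem.List.enumerate vals).map (fun jv =>
        PySem.Int.bor jv.2 (PySem.Int.band (Int.not (altMask length jv.1)) 255))
    -- mn[-1] |= 2 ; mx[-1] &= 0xFE  (vals is nonempty, so [-1] is the last element)
    let mn2 := mn.dropLast ++ [PySem.Int.bor (mn.getLastD 0) 2]
    let mx2 := mx.dropLast ++ [PySem.Int.band (mx.getLastD 0) 254]
    (String.ofList (PySem.Chars.join ['.'] (mn2.map PySem.Int.toChars)),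
     String.ofList (PySem.Chars.join ['.'] (mx2.map PySem.Int.toChars)))

-- ===== PRECONDITION & SPEC =====

-- Pre_ excludes (a) prefixes where some dot-separated field is not parseable as a nonnegative
-- integer — there Python A raises ValueError — and (b) prefixes with a field outside the natural
-- dotted-decimal domain 0..255, where A's "%08d" field grows beyond 8 characters and shifts the
-- bit layout (A still returns a value there; see the cite in the claim).
def Pre_max_min_ip_in_prefix (prefix_ : String) (length : Int) : Prop :=
  ∀ p ∈ PySem.Chars.splitOn prefix_.toList ['.'],
    (PySem.Int.ofChars? p).isSome ∧ 0 ≤ (PySem.Int.ofChars? p).getD 0 ∧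
      (PySem.Int.ofChars? p).getD 0 ≤ 255

instance (prefix_ : String) (length : Int) : Decidable (Pre_max_min_ip_in_prefix prefix_ length) := by
  unfold Pre_max_min_ip_in_prefix; infer_instance

def pvWitness_max_min_ip_in_prefix : String × Int := ("10.0.0.0", 8)

def Spec_max_min_ip_in_prefix (prefix_ : String) (length : Int) (out : String × String) : Prop :=
  out = max_min_ip_in_prefix_alt prefix_ length
instance (prefix_ : String) (length : Int) (out : String × String) :
    Decidable (Spec_max_min_ip_in_prefix prefix_ length out) := by
  unfold Spec_max_min_ip_in_prefix; infer_instance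

-- ===== CLAIM (what is proved, stated in full; the proofs are below) =====
def Claim_equal_max_min_ip_in_prefix : Prop :=
  ∀ (prefix_ : String) (length : Int), Dom_max_min_ip_in_prefix prefix_ length →
    Pre_max_min_ip_in_prefix prefix_ length →
    Spec_max_min_ip_in_prefix prefix_ length (max_min_ip_in_prefix prefix_ length)

-- ===== LEMMAS AND PROOFS =====


-- ---- proof-side vocabulary ----

-- the 8-bit binary string of v (v < 256)
def bits8 (v : Nat) : List Char :=
  (List.range 8).map (fun i => if (v >>> (7 - i)) % 2 == 1 then '1' else '0')

-- replace every character from position k on by c1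
def applyK (c1 : Char) (k : Nat) (b : List Char) : List Char :=
  b.mapIdx (fun p c => if k ≤ p then c1 else c)

-- what A's scan does to a character string: non-dot char at bit count r is replaced by c1 iff r+1 > L
def mark (c1 : Char) (L : Int) : List Char → Int → List Char
  | [], _ => []
  | c :: t, r => if c ≠ '.' then (if r + 1 > L then c1 else c) :: mark c1 L t (r + 1)
                 else c :: mark c1 L t r

-- clamped keep count and 8-bit netmask
def kc (L j : Int) : Nat := (min 8 (max 0 (L - 8 * j))).toNat
def mN (k : Nat) : Nat := (255 <<< (8 - k)) &&& 255

-- per-octet result values (min side / max side), octet index starting at j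
def wsMn (L : Int) : List Nat → Int → List Nat
  | [], _ => []
  | v :: t, j => (v &&& mN (kc L j)) :: wsMn L t (j + 1)
def wsMx (L : Int) : List Nat → Int → List Nat
  | [], _ => []
  | v :: t, j => (v ||| (255 ^^^ mN (kc L j))) :: wsMx L t (j + 1)

-- ---- finite facts, by decide ----

set_option maxHeartbeats 2000000 in
set_option maxRecDepth 40000 in
theorem blockA_bits8 : ∀ v : Nat, v < 256 →
    ((PySem.Int.ofChars? (List.drop 2 (pyBinChars (v : Int)))).map
      (fun d => PySem.Chars.zfill (PySem.Int.toChars d) 8)) = some (bits8 v) := by decide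

set_option maxHeartbeats 4000000 in
set_option maxRecDepth 40000 in
theorem parse_bits8 : ∀ v : Nat, v < 256 →
    PySem.Int.ofCharsBase? (bits8 v) 2 = some (v : Int) := by decide

set_option maxHeartbeats 2000000 in
set_option maxRecDepth 40000 in
theorem applyK_mn : ∀ v : Nat, v < 256 → ∀ k : Nat, k < 9 →
    applyK '0' k (bits8 v) = bits8 (v &&& mN k) := by decide

set_option maxHeartbeats 2000000 in
set_option maxRecDepth 40000 in
theorem applyK_mx : ∀ v : Nat, v < 256 → ∀ k : Nat, k < 9 →
    applyK '1' k (bits8 v) = bits8 (v ||| (255 ^^^ mN k)) := by decide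

set_option maxHeartbeats 2000000 in
set_option maxRecDepth 40000 in
theorem set6_bits8 : ∀ v : Nat, v < 256 → (bits8 v).set 6 '1' = bits8 (v ||| 2) := by decide

set_option maxHeartbeats 2000000 in
set_option maxRecDepth 40000 in
theorem set7_bits8 : ∀ v : Nat, v < 256 → (bits8 v).set 7 '0' = bits8 (v &&& 254) := by decide

theorem maskInt_mn : ∀ k : Nat, k < 9 →
    PySem.Int.band ((255 : Int) <<< (8 - k)) 255 = ((mN k : Nat) : Int) := by decide

theorem maskInt_mx : ∀ k : Nat, k < 9 →
    PySem.Int.band (Int.not ((mN k : Nat) : Int)) 255 = ((255 ^^^ mN k : Nat) : Int) := by decide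

def numND (cs : List Char) : Int := ((cs.filter (fun c => c ≠ '.')).length : Int)

theorem length_bits8 (v : Nat) : (bits8 v).length = 8 := by simp [bits8]

theorem nodot_bits8 (v : Nat) : ∀ c ∈ bits8 v, c ≠ '.' := by
  intro c hc
  simp only [bits8, List.mem_map] at hc
  obtain ⟨i, -, rfl⟩ := hc
  split <;> decide

theorem splitOnP_ne_nil (p : Char → Bool) (l : List Char) : List.splitOnP p l ≠ [] := by
  induction l with
  | nil => simp [List.splitOnP_nil]
  | cons c t ih =>
    rw [List.splitOnP_cons]
    split
    · simp
    · cases h : List.splitOnP p t with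
      | nil => exact absurd h ih
      | cons a l' => simp [h]

theorem wsMn_length (L : Int) : ∀ (ws : List Nat) (j : Int), (wsMn L ws j).length = ws.length := by
  intro ws; induction ws with
  | nil => intro j; rfl
  | cons v t ih => intro j; rw [wsMn]; simp [ih (j + 1)]

theorem wsMx_length (L : Int) : ∀ (ws : List Nat) (j : Int), (wsMx L ws j).length = ws.length := by
  intro ws; induction ws with
  | nil => intro j; rfl
  | cons v t ih => intro j; rw [wsMx]; simp [ih (j + 1)]
-- ---- splitOn bridge proofs ----

theorem splitOn_go_spec (c : Char) : ∀ (fuel : Nat) (l cur : List Char) (acc : List (List Char)),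
    l.length < fuel →
    PySem.Chars.splitOn.go [c] fuel l cur acc
      = acc.reverse ++ (List.splitOn c l).modifyHead (cur.reverse ++ ·) := by
  intro fuel
  induction fuel with
  | zero => intro l cur acc h; simp at h
  | succ f ih =>
    intro l cur acc h
    cases l with
    | nil => simp [PySem.Chars.splitOn.go, List.splitOn_nil]
    | cons a t =>
      rw [PySem.Chars.splitOn.go]
      by_cases hac : a = c
      · subst hac
        have hpre : [a].isPrefixOf (a :: t) = true := by simp [List.isPrefixOf]
        rw [if_pos hpre]
        rw [ih _ _ _ (by simpa using h)]
        simp only [List.splitOn, List.splitOnP_cons, BEq.rfl, if_pos]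
        cases hsp : List.splitOnP (fun x => x == a) t <;> simp [hsp]
      · have hpre : [c].isPrefixOf (a :: t) = false := by
          simp [List.isPrefixOf]; exact fun hh => absurd hh.symm hac
        rw [if_neg (by simp [hpre])]
        rw [ih _ _ _ (by simpa using h)]
        have hbeq : (a == c) = false := by simp [hac]
        simp only [List.splitOn, List.splitOnP_cons, hbeq, if_neg Bool.false_ne_true]
        rw [List.modifyHead_modifyHead]
        cases hsp : List.splitOnP (fun x => x == c) t <;> simp [hsp]

theorem chars_splitOn_eq (c : Char) (s : List Char) :
    PySem.Chars.splitOn s [c] = List.splitOn c s := by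
  unfold PySem.Chars.splitOn
  rw [splitOn_go_spec c (s.length + 1) s [] [] (by omega)]
  cases hsp : List.splitOn c s <;> simp [hsp]

theorem chars_splitOn_ne_nil (c : Char) (s : List Char) :
    PySem.Chars.splitOn s [c] ≠ [] := by
  rw [chars_splitOn_eq]; exact splitOnP_ne_nil _ _

theorem join_eq_intercalate (bs : List (List Char)) :
    PySem.Chars.join ['.'] bs = ['.'].intercalate bs := rfl

theorem splitOn_join (bs : List (List Char)) (hne : bs ≠ [])
    (hnd : ∀ b ∈ bs, '.' ∉ b) :
    PySem.Chars.splitOn (PySem.Chars.join ['.'] bs) ['.'] = bs := by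
  rw [chars_splitOn_eq, join_eq_intercalate, List.splitOn_intercalate bs '.' hnd hne]

-- ---- the three mapM computations ----

theorem mapM_blocks (ps : List (List Char))
    (h : ∀ p ∈ ps, (PySem.Int.ofChars? p).isSome ∧ 0 ≤ (PySem.Int.ofChars? p).getD 0 ∧
          (PySem.Int.ofChars? p).getD 0 ≤ 255) :
    ps.mapM (fun x =>
      (PySem.Int.ofChars? x).bind (fun v =>
        (PySem.Int.ofChars? (List.drop 2 (pyBinChars v))).map (fun d =>
          PySem.Chars.zfill (PySem.Int.toChars d) 8)))
      = some (ps.map (fun p => bits8 ((PySem.Int.ofChars? p).getD 0).toNat)) := by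
  induction ps with
  | nil => simp
  | cons p t ih =>
    obtain ⟨h1, h2, h3⟩ := h p (List.mem_cons_self)
    obtain ⟨v, hv⟩ := Option.isSome_iff_exists.mp h1
    have h2' : 0 ≤ v := by rw [hv] at h2; simpa using h2
    have h3' : v ≤ 255 := by rw [hv] at h3; simpa using h3
    have hcast : ((v.toNat : Nat) : Int) = v := Int.toNat_of_nonneg h2'
    have hlt : v.toNat < 256 := by omega
    have hbl := blockA_bits8 v.toNat hlt
    rw [hcast] at hbl
    simp only [List.mapM_cons, hv, Option.bind_some, hbl,
      ih (fun q hq => h q (List.mem_cons_of_mem _ hq))]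
    simp [hv]

theorem mapM_ofChars (ps : List (List Char))
    (h : ∀ p ∈ ps, (PySem.Int.ofChars? p).isSome ∧ 0 ≤ (PySem.Int.ofChars? p).getD 0 ∧
          (PySem.Int.ofChars? p).getD 0 ≤ 255) :
    ps.mapM PySem.Int.ofChars?
      = some (ps.map (fun p => ((((PySem.Int.ofChars? p).getD 0).toNat : Nat) : Int))) := by
  induction ps with
  | nil => simp
  | cons p t ih =>
    obtain ⟨h1, h2, -⟩ := h p (List.mem_cons_self)
    obtain ⟨v, hv⟩ := Option.isSome_iff_exists.mp h1
    have h2' : 0 ≤ v := by rw [hv] at h2; simpa using h2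
    have hcast : ((v.toNat : Nat) : Int) = v := Int.toNat_of_nonneg h2'
    have hfp : ((((PySem.Int.ofChars? p).getD 0).toNat : Nat) : Int) = v := by
      rw [hv]; simpa using hcast
    simp only [List.mapM_cons, hv, ih (fun q hq => h q (List.mem_cons_of_mem _ hq))]
    simp [hv]
    omega

theorem mapM_parse (ws : List Nat) (h : ∀ w ∈ ws, w < 256) :
    (ws.map bits8).mapM (fun x => (PySem.Int.ofCharsBase? x 2).map PySem.Int.toChars)
      = some (ws.map (fun w => PySem.Int.toChars ((w : Nat) : Int))) := by
  induction ws with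
  | nil => simp
  | cons w t ih =>
    simp only [List.map_cons, List.mapM_cons,
      parse_bits8 w (h w List.mem_cons_self),
      ih (fun q hq => h q (List.mem_cons_of_mem _ hq))]
    simp

-- ---- the scan loop is `mark` ----

theorem loop_eq (L : Int) : ∀ (cs pre1 pre2 : List Char) (r : Int),
    pre2.length = pre1.length →
    (PySem.List.enumerate cs (pre1.length : Int)).foldl (loopBody L) (pre1 ++ cs, pre2 ++ cs, r)
      = (pre1 ++ mark '1' L cs r, pre2 ++ mark '0' L cs r, r + numND cs) := by
  intro cs
  induction cs with
  | nil => intro pre1 pre2 r _; simp [PySem.List.enumerate_nil, mark, numND]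
  | cons c t ih =>
    intro pre1 pre2 r hlen
    rw [PySem.List.enumerate_cons, List.foldl_cons]
    by_cases hc : c = '.'
    · subst hc
      have hbody : loopBody L (pre1 ++ '.' :: t, pre2 ++ '.' :: t, r) ((pre1.length : Int), '.')
          = (pre1 ++ '.' :: t, pre2 ++ '.' :: t, r) := by simp [loopBody]
      rw [hbody]
      have e1 : pre1 ++ '.' :: t = (pre1 ++ ['.']) ++ t := by simp
      have e2 : pre2 ++ '.' :: t = (pre2 ++ ['.']) ++ t := by simp
      have e3 : (pre1.length : Int) + 1 = (((pre1 ++ ['.']).length : Nat) : Int) := by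
        simp
      rw [e1, e2, e3, ih (pre1 ++ ['.']) (pre2 ++ ['.']) r (by simp [hlen])]
      simp [mark, numND]
    · have hset1 : (pre1 ++ c :: t).set pre1.length '1' = pre1 ++ '1' :: t := by simp
      have hset2 : (pre2 ++ c :: t).set pre1.length '0' = pre2 ++ '0' :: t := by
        rw [← hlen]; simp
      by_cases hr : r + 1 > L
      · have hbody : loopBody L (pre1 ++ c :: t, pre2 ++ c :: t, r) ((pre1.length : Int), c)
            = (pre1 ++ '1' :: t, pre2 ++ '0' :: t, r + 1) := by
          simp [loopBody, hc, hr, hset1, hset2]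
        rw [hbody]
        have e1 : pre1 ++ '1' :: t = (pre1 ++ ['1']) ++ t := by simp
        have e2 : pre2 ++ '0' :: t = (pre2 ++ ['0']) ++ t := by simp
        have e3 : (pre1.length : Int) + 1 = (((pre1 ++ ['1']).length : Nat) : Int) := by
          simp
        rw [e1, e2, e3, ih (pre1 ++ ['1']) (pre2 ++ ['0']) (r + 1) (by simp [hlen])]
        have hm1 : mark '1' L (c :: t) r = '1' :: mark '1' L t (r + 1) := by
          simp [mark, hc, hr]
        have hm0 : mark '0' L (c :: t) r = '0' :: mark '0' L t (r + 1) := by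
          simp [mark, hc, hr]
        have hnd : numND (c :: t) = numND t + 1 := by
          simp [numND, hc]
        rw [hm1, hm0, hnd]
        simp only [Prod.mk.injEq]
        refine ⟨by simp, by simp, by omega⟩
      · have hbody : loopBody L (pre1 ++ c :: t, pre2 ++ c :: t, r) ((pre1.length : Int), c)
            = (pre1 ++ c :: t, pre2 ++ c :: t, r + 1) := by
          simp [loopBody, hc, hr]
        rw [hbody]
        have e1 : pre1 ++ c :: t = (pre1 ++ [c]) ++ t := by simp
        have e3 : (pre1.length : Int) + 1 = (((pre1 ++ [c]).length : Nat) : Int) := by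
          simp
        rw [e1, show pre2 ++ c :: t = (pre2 ++ [c]) ++ t by simp, e3,
          ih (pre1 ++ [c]) (pre2 ++ [c]) (r + 1) (by simp [hlen])]
        have hm1 : mark '1' L (c :: t) r = c :: mark '1' L t (r + 1) := by
          simp [mark, hc, hr]
        have hm0 : mark '0' L (c :: t) r = c :: mark '0' L t (r + 1) := by
          simp [mark, hc, hr]
        have hnd : numND (c :: t) = numND t + 1 := by
          simp [numND, hc]
        rw [hm1, hm0, hnd]
        simp only [Prod.mk.injEq]
        refine ⟨by simp, by simp, by omega⟩

-- ---- mark on dot-free blocks ----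

theorem mark_append (c1 : Char) (L : Int) : ∀ (b rest : List Char), (∀ c ∈ b, c ≠ '.') →
    ∀ r : Int, mark c1 L (b ++ rest) r = mark c1 L b r ++ mark c1 L rest (r + b.length) := by
  intro b
  induction b with
  | nil => intro rest _ r; simp [mark]
  | cons c t ih =>
    intro rest hb r
    have hc : c ≠ '.' := hb c List.mem_cons_self
    simp only [List.cons_append, mark, hc, ne_eq, not_false_iff, if_true]
    rw [ih rest (fun x hx => hb x (List.mem_cons_of_mem _ hx)) (r + 1)]
    simp only [List.length_cons]
    have harith : r + 1 + (t.length : Int) = r + (((t.length : Nat) + 1 : Nat) : Int) := by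
      push_cast; ring
    rw [harith]

theorem mark_nodot_eq_mapIdx (c1 : Char) (L : Int) : ∀ (b : List Char), (∀ c ∈ b, c ≠ '.') →
    ∀ r : Int, mark c1 L b r = b.mapIdx (fun p c => if r + p + 1 > L then c1 else c) := by
  intro b
  induction b with
  | nil => intro _ r; simp [mark]
  | cons c t ih =>
    intro hb r
    have hc : c ≠ '.' := hb c List.mem_cons_self
    rw [List.mapIdx_cons]
    simp only [mark, hc, ne_eq, not_false_iff, if_true]
    rw [ih (fun x hx => hb x (List.mem_cons_of_mem _ hx)) (r + 1)]
    congr 1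
    · norm_num
    · apply List.ext_getElem (by simp)
      intro i h1 h2
      simp only [List.getElem_mapIdx]
      rw [show r + 1 + (i : Int) + 1 = r + (((i + 1 : Nat)) : Int) + 1 by push_cast; ring]

theorem mark_eq_applyK (c1 : Char) (L : Int) (b : List Char) (hb : ∀ c ∈ b, c ≠ '.')
    (hlen : b.length ≤ 8) (r : Int) :
    mark c1 L b r = applyK c1 ((min 8 (max 0 (L - r))).toNat) b := by
  rw [mark_nodot_eq_mapIdx c1 L b hb r]
  unfold applyK
  apply List.ext_getElem
  · simp
  · intro i h1 h2
    simp only [List.getElem_mapIdx]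
    have hi8 : i < 8 := by
      have := List.length_mapIdx (f := fun p c => if r + p + 1 > L then c1 else c) (l := b)
      omega
    have hiff : (r + (i : Int) + 1 > L) ↔ ((min 8 (max 0 (L - r))).toNat ≤ i) := by omega
    by_cases hcond : r + (i : Int) + 1 > L
    · rw [if_pos hcond, if_pos (hiff.mp hcond)]
    · rw [if_neg hcond, if_neg (fun hh => hcond (hiff.mpr hh))]

-- ---- mark over the joined blocks ----

theorem mark_join_mn (L : Int) : ∀ (ws : List Nat) (j : Int), (∀ v ∈ ws, v < 256) →
    mark '0' L (PySem.Chars.join ['.'] (ws.map bits8)) (8 * j)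
      = PySem.Chars.join ['.'] ((wsMn L ws j).map bits8) := by
  intro ws
  induction ws with
  | nil => intro j _; simp [PySem.Chars.join_nil, mark, wsMn]
  | cons v t ih =>
    intro j h
    have hv : v < 256 := h v List.mem_cons_self
    have hk : kc L j < 9 := by unfold kc; omega
    have hone : mark '0' L (bits8 v) (8 * j) = bits8 (v &&& mN (kc L j)) := by
      rw [mark_eq_applyK '0' L (bits8 v) (nodot_bits8 v) (by rw [length_bits8]) (8 * j)]
      have hkc : (min 8 (max 0 (L - 8 * j))).toNat = kc L j := rfl
      rw [hkc, applyK_mn v hv (kc L j) hk]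
    cases t with
    | nil => simp only [List.map_cons, List.map_nil, PySem.Chars.join_singleton, hone, wsMn]
    | cons w t' =>
      rw [show List.map bits8 (v :: w :: t') = bits8 v :: bits8 w :: List.map bits8 t' from rfl,
        PySem.Chars.join_cons_cons, List.append_assoc,
        mark_append '0' L (bits8 v) _ (nodot_bits8 v) (8 * j), length_bits8]
      rw [show (8 : Int) * j + ((8 : Nat) : Int) = 8 * (j + 1) by push_cast; ring]
      have hdot : ∀ (X : List Char) (r : Int), mark '0' L ('.' :: X) r = '.' :: mark '0' L X r := by
        intro X r; rw [mark]; simp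
      rw [show ['.'] ++ PySem.Chars.join ['.'] (bits8 w :: List.map bits8 t')
            = '.' :: PySem.Chars.join ['.'] (bits8 w :: List.map bits8 t') from rfl, hdot]
      rw [show bits8 w :: List.map bits8 t' = List.map bits8 (w :: t') from rfl]
      rw [ih (j + 1) (fun x hx => h x (List.mem_cons_of_mem _ hx)), hone]
      rw [show wsMn L (v :: w :: t') j = (v &&& mN (kc L j)) :: wsMn L (w :: t') (j + 1) by rw [wsMn]]
    
      rw [show wsMn L (w :: t') (j + 1)
            = (w &&& mN (kc L (j + 1))) :: wsMn L t' (j + 1 + 1) by rw [wsMn]]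
      simp [PySem.Chars.join_cons_cons]

theorem mark_join_mx (L : Int) : ∀ (ws : List Nat) (j : Int), (∀ v ∈ ws, v < 256) →
    mark '1' L (PySem.Chars.join ['.'] (ws.map bits8)) (8 * j)
      = PySem.Chars.join ['.'] ((wsMx L ws j).map bits8) := by
  intro ws
  induction ws with
  | nil => intro j _; simp [PySem.Chars.join_nil, mark, wsMx]
  | cons v t ih =>
    intro j h
    have hv : v < 256 := h v List.mem_cons_self
    have hk : kc L j < 9 := by unfold kc; omega
    have hone : mark '1' L (bits8 v) (8 * j) = bits8 (v ||| (255 ^^^ mN (kc L j))) := by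
      rw [mark_eq_applyK '1' L (bits8 v) (nodot_bits8 v) (by rw [length_bits8]) (8 * j)]
      have hkc : (min 8 (max 0 (L - 8 * j))).toNat = kc L j := rfl
      rw [hkc, applyK_mx v hv (kc L j) hk]
    cases t with
    | nil => simp only [List.map_cons, List.map_nil, PySem.Chars.join_singleton, hone, wsMx]
    | cons w t' =>
      rw [show List.map bits8 (v :: w :: t') = bits8 v :: bits8 w :: List.map bits8 t' from rfl,
        PySem.Chars.join_cons_cons, List.append_assoc,
        mark_append '1' L (bits8 v) _ (nodot_bits8 v) (8 * j), length_bits8]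
      rw [show (8 : Int) * j + ((8 : Nat) : Int) = 8 * (j + 1) by push_cast; ring]
      have hdot : ∀ (X : List Char) (r : Int), mark '1' L ('.' :: X) r = '.' :: mark '1' L X r := by
        intro X r; rw [mark]; simp
      rw [show ['.'] ++ PySem.Chars.join ['.'] (bits8 w :: List.map bits8 t')
            = '.' :: PySem.Chars.join ['.'] (bits8 w :: List.map bits8 t') from rfl, hdot]
      rw [show bits8 w :: List.map bits8 t' = List.map bits8 (w :: t') from rfl]
      rw [ih (j + 1) (fun x hx => h x (List.mem_cons_of_mem _ hx)), hone]
      rw [show wsMx L (v :: w :: t') j = (v ||| (255 ^^^ mN (kc L j))) :: wsMx L (w :: t') (j + 1) by rw [wsMx]]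
    
      rw [show wsMx L (w :: t') (j + 1)
            = (w ||| (255 ^^^ mN (kc L (j + 1)))) :: wsMx L t' (j + 1 + 1) by rw [wsMx]]
      simp [PySem.Chars.join_cons_cons]

-- ---- setting the second-to-last / last character of the joined string ----

theorem join_length_ge (b : List Char) (bs : List (List Char)) :
    b.length ≤ (PySem.Chars.join ['.'] (b :: bs)).length := by
  cases bs with
  | nil => simp [PySem.Chars.join_singleton]
  | cons b2 bs' => rw [PySem.Chars.join_cons_cons]; simp

theorem join_cons_of_ne (b : List Char) (bs : List (List Char)) (h : bs ≠ []) :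
    PySem.Chars.join ['.'] (b :: bs) = b ++ '.' :: PySem.Chars.join ['.'] bs := by
  cases bs with
  | nil => exact absurd rfl h
  | cons b2 t => rw [PySem.Chars.join_cons_cons]; simp

theorem set_join_last (ch : Char) (i : Nat) (hi : i < 8) :
    ∀ (bs : List (List Char)) (hne : bs ≠ []), (∀ b ∈ bs, b.length = 8) →
    (PySem.Chars.join ['.'] bs).set ((PySem.Chars.join ['.'] bs).length - (8 - i)) ch
      = PySem.Chars.join ['.'] (bs.dropLast ++ [(bs.getLast hne).set i ch]) := by
  intro bs
  induction bs with
  | nil => intro hne _; exact absurd rfl hne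
  | cons b t ih =>
    intro hne hlen
    cases t with
    | nil =>
      have hb : b.length = 8 := hlen b List.mem_cons_self
      simp only [List.getLast_singleton, PySem.Chars.join_singleton]
      rw [show ([b] : List (List Char)).dropLast = [] from rfl, List.nil_append,
        PySem.Chars.join_singleton, hb, show 8 - (8 - i) = i by omega]
    | cons b2 t' =>
      have hb : b.length = 8 := hlen b List.mem_cons_self
      have hb2 : b2.length = 8 := hlen b2 (List.mem_cons_of_mem _ List.mem_cons_self)
      have hrest := join_length_ge b2 t'
      rw [PySem.Chars.join_cons_cons]
      set R := PySem.Chars.join ['.'] (b2 :: t') with hR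
      have hRlen : 8 ≤ R.length := by rw [← hb2]; exact hrest
      have hidx : (b ++ ['.'] ++ R).length - (8 - i)
          = (b ++ ['.']).length + (R.length - (8 - i)) := by simp; omega
      rw [hidx, List.set_append_right _ _ (Nat.le_add_right _ _), Nat.add_sub_cancel_left]
      rw [ih (by simp) (fun x hx => hlen x (List.mem_cons_of_mem _ hx))]
      rw [List.getLast_cons (l := b2 :: t') (by simp), show (b :: b2 :: t').dropLast = b :: (b2 :: t').dropLast from rfl]
      rw [List.cons_append, join_cons_of_ne _ _ (by simp)]
      simp

-- ---- bounds and shape facts about the octet value lists ----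

theorem wsMn_lt (L : Int) : ∀ (ws : List Nat) (j : Int), (∀ v ∈ ws, v < 256) →
    ∀ w ∈ wsMn L ws j, w < 256 := by
  intro ws
  induction ws with
  | nil => intro j _ w hw; simp [wsMn] at hw
  | cons v t ih =>
    intro j h w hw
    rw [wsMn] at hw
    rcases List.mem_cons.mp hw with rfl | hw'
    · exact lt_of_le_of_lt (Nat.and_le_left) (h v List.mem_cons_self)
    · exact ih (j + 1) (fun x hx => h x (List.mem_cons_of_mem _ hx)) w hw'

theorem mN_le (k : Nat) : mN k ≤ 255 := Nat.and_le_right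

theorem wsMx_lt (L : Int) : ∀ (ws : List Nat) (j : Int), (∀ v ∈ ws, v < 256) →
    ∀ w ∈ wsMx L ws j, w < 256 := by
  intro ws
  induction ws with
  | nil => intro j _ w hw; simp [wsMx] at hw
  | cons v t ih =>
    intro j h w hw
    rw [wsMx] at hw
    rcases List.mem_cons.mp hw with rfl | hw'
    · exact Nat.or_lt_two_pow (n := 8) (h v List.mem_cons_self)
        (Nat.xor_lt_two_pow (by norm_num) (lt_of_le_of_lt (mN_le _) (by norm_num)))
    · exact ih (j + 1) (fun x hx => h x (List.mem_cons_of_mem _ hx)) w hw'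

-- ---- altMask and the B-side maps ----

theorem altMask_eq (L j : Int) : altMask L j = ((mN (kc L j) : Nat) : Int) := by
  have hk : kc L j < 9 := by unfold kc; omega
  have h8 : (8 - min 8 (max 0 (L - 8 * j))).toNat = 8 - kc L j := by unfold kc; omega
  unfold altMask
  rw [h8]
  exact maskInt_mn (kc L j) hk

theorem benum_mn (L : Int) : ∀ (ws : List Nat) (j : Int),
    (PySem.List.enumerate (ws.map (fun w => ((w : Nat) : Int))) j).map
        (fun jv => PySem.Int.band jv.2 (altMask L jv.1))
      = (wsMn L ws j).map (fun w => ((w : Nat) : Int)) := by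
  intro ws
  induction ws with
  | nil => intro j; simp [PySem.List.enumerate_nil, wsMn]
  | cons v t ih =>
    intro j
    rw [List.map_cons, PySem.List.enumerate_cons, List.map_cons, ih (j + 1)]
    rw [wsMn, List.map_cons]
    congr 1
    rw [altMask_eq L j]
    exact PySem.Int.band_natCast v (mN (kc L j))

theorem benum_mx (L : Int) : ∀ (ws : List Nat) (j : Int),
    (PySem.List.enumerate (ws.map (fun w => ((w : Nat) : Int))) j).map
        (fun jv => PySem.Int.bor jv.2 (PySem.Int.band (Int.not (altMask L jv.1)) 255))
      = (wsMx L ws j).map (fun w => ((w : Nat) : Int)) := by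
  intro ws
  induction ws with
  | nil => intro j; simp [PySem.List.enumerate_nil, wsMx]
  | cons v t ih =>
    intro j
    rw [List.map_cons, PySem.List.enumerate_cons, List.map_cons, ih (j + 1)]
    rw [wsMx, List.map_cons]
    congr 1
    have hk : kc L j < 9 := by unfold kc; omega
    rw [altMask_eq L j, maskInt_mx (kc L j) hk]
    exact PySem.Int.bor_natCast v (255 ^^^ mN (kc L j))

-- ---- last-element helpers ----

theorem getLastD_map_cast (l : List Nat) (f : Nat → Int) (h : l ≠ []) (d : Int) :
    (l.map f).getLastD d = f (l.getLast h) := by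
  rw [List.getLastD_eq_getLast?, List.getLast?_eq_some_getLast (l := l.map f) (by simp [h]),
    Option.getD_some, List.getLast_map]

-- ===== VERDICT (by name: the statement is the Claim_ definition above) =====
theorem max_min_ip_in_prefix_spec : Claim_equal_max_min_ip_in_prefix := by
  intro prefix_ length hDom hPre
  unfold Spec_max_min_ip_in_prefix
  unfold Pre_max_min_ip_in_prefix at hPre
  set ps := PySem.Chars.splitOn prefix_.toList ['.'] with hpsdef
  set vs : List Nat := ps.map (fun p => ((PySem.Int.ofChars? p).getD 0).toNat) with hvsdef
  have hvs256 : ∀ v ∈ vs, v < 256 := by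
    intro v hv
    rw [hvsdef] at hv
    obtain ⟨p, hp, rfl⟩ := List.mem_map.mp hv
    have h3 := (hPre p hp).2.2
    omega
  have hpsne : ps ≠ [] := chars_splitOn_ne_nil _ _
  have hvsne : vs ≠ [] := by
    rw [hvsdef]; intro hc; exact hpsne (List.map_eq_nil_iff.mp hc)
  set W := wsMn length vs 0 with hWdef
  set X := wsMx length vs 0 with hXdef
  have hWne : W ≠ [] := by
    rw [hWdef]; intro hc
    have := wsMn_length length vs 0
    rw [hc] at this; exact hvsne (List.length_eq_zero_iff.mp this.symm)
  have hXne : X ≠ [] := by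
    rw [hXdef]; intro hc
    have := wsMx_length length vs 0
    rw [hc] at this; exact hvsne (List.length_eq_zero_iff.mp this.symm)
  have hW256 : ∀ w ∈ W, w < 256 := by rw [hWdef]; exact wsMn_lt length vs 0 hvs256
  have hX256 : ∀ w ∈ X, w < 256 := by rw [hXdef]; exact wsMx_lt length vs 0 hvs256
  set WF : List Nat := W.dropLast ++ [W.getLast hWne ||| 2] with hWFdef
  set XF : List Nat := X.dropLast ++ [X.getLast hXne &&& 254] with hXFdef
  have hWF256 : ∀ w ∈ WF, w < 256 := by
    intro w hw
    rw [hWFdef] at hw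
    rcases List.mem_append.mp hw with hw' | hw'
    · exact hW256 w (List.mem_of_mem_dropLast hw')
    · have hlast : W.getLast hWne < 256 := hW256 _ (List.getLast_mem hWne)
      have h2 : (2 : Nat) < 2 ^ 8 := by norm_num
      have := Nat.or_lt_two_pow (n := 8) hlast h2
      simp at hw'
      omega
  have hXF256 : ∀ w ∈ XF, w < 256 := by
    intro w hw
    rw [hXFdef] at hw
    rcases List.mem_append.mp hw with hw' | hw'
    · exact hX256 w (List.mem_of_mem_dropLast hw')
    · have hlast : X.getLast hXne < 256 := hX256 _ (List.getLast_mem hXne)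
      have hle : X.getLast hXne &&& 254 ≤ X.getLast hXne := Nat.and_le_left
      simp at hw'
      omega
  have hWFne : WF ≠ [] := by rw [hWFdef]; simp
  have hXFne : XF ≠ [] := by rw [hXFdef]; simp
  -- parse lemma applied to both final lists
  have hparse : ∀ (F : List Nat), F ≠ [] → (∀ w ∈ F, w < 256) →
      ipBinToDec (PySem.Chars.join ['.'] (F.map bits8))
        = some (PySem.Chars.join ['.'] (F.map (fun w => PySem.Int.toChars ((w : Nat) : Int)))) := by
    intro F hFne hF256
    unfold ipBinToDec
    rw [splitOn_join _ (by simp [hFne]) (by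
      intro b hb
      obtain ⟨w, hw, rfl⟩ := List.mem_map.mp hb
      intro hdot
      exact nodot_bits8 w '.' hdot rfl)]
    rw [mapM_parse F hF256]
    simp
  -- ---- evaluate port A ----
  have hA1 : ipDecToBin prefix_.toList = some (PySem.Chars.join ['.'] (vs.map bits8)) := by
    unfold ipDecToBin
    rw [← hpsdef, mapM_blocks ps hPre]
    simp [hvsdef, List.map_map, Function.comp_def]
  have hloop := loop_eq length (PySem.Chars.join ['.'] (vs.map bits8)) [] [] 0 rfl
  simp only [List.nil_append, List.length_nil, Nat.cast_zero, zero_add] at hloop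
  have hm1 := mark_join_mx length vs 0 hvs256
  have hm0 := mark_join_mn length vs 0 hvs256
  simp only [mul_zero] at hm1 hm0
  rw [hm1, hm0, ← hWdef, ← hXdef] at hloop
  have hlen8W : ∀ b ∈ W.map bits8, b.length = 8 := by
    intro b hb; obtain ⟨w, -, rfl⟩ := List.mem_map.mp hb; exact length_bits8 w
  have hlen8X : ∀ b ∈ X.map bits8, b.length = 8 := by
    intro b hb; obtain ⟨w, -, rfl⟩ := List.mem_map.mp hb; exact length_bits8 w
  have hsetX := set_join_last '0' 7 (by norm_num) (X.map bits8) (by simp [hXne]) hlen8X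
  have hsetW := set_join_last '1' 6 (by norm_num) (W.map bits8) (by simp [hWne]) hlen8W
  norm_num at hsetX hsetW
  have hglX : (X.map bits8).getLast (by simp [hXne]) = bits8 (X.getLast hXne) :=
    List.getLast_map _
  have hglW : (W.map bits8).getLast (by simp [hWne]) = bits8 (W.getLast hWne) :=
    List.getLast_map _
  have hblocksX : (X.map bits8).dropLast ++ [(bits8 (X.getLast hXne)).set 7 '0']
      = XF.map bits8 := by
    rw [set7_bits8 _ (hX256 _ (List.getLast_mem hXne)), ← List.map_dropLast, hXFdef]
    simp
  have hblocksW : (W.map bits8).dropLast ++ [(bits8 (W.getLast hWne)).set 6 '1']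
      = WF.map bits8 := by
    rw [set6_bits8 _ (hW256 _ (List.getLast_mem hWne)), ← List.map_dropLast, hWFdef]
    simp
  have hA : max_min_ip_in_prefix prefix_ length
      = (String.ofList (PySem.Chars.join ['.'] (WF.map (fun w => PySem.Int.toChars ((w : Nat) : Int)))),
         String.ofList (PySem.Chars.join ['.'] (XF.map (fun w => PySem.Int.toChars ((w : Nat) : Int))))) := by
    unfold max_min_ip_in_prefix
    rw [hA1]
    simp only [hloop]
    rw [hsetX, hsetW, hblocksX, hblocksW, hparse WF hWFne hWF256, hparse XF hXFne hXF256]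
  -- ---- evaluate port B ----
  have hvals : ps.map (fun p => ((((PySem.Int.ofChars? p).getD 0).toNat : Nat) : Int))
      = vs.map (fun w => ((w : Nat) : Int)) := by
    rw [hvsdef, List.map_map]; rfl
  have hB : max_min_ip_in_prefix_alt prefix_ length
      = (String.ofList (PySem.Chars.join ['.'] (WF.map (fun w => PySem.Int.toChars ((w : Nat) : Int)))),
         String.ofList (PySem.Chars.join ['.'] (XF.map (fun w => PySem.Int.toChars ((w : Nat) : Int))))) := by
    unfold max_min_ip_in_prefix_alt
    rw [← hpsdef, mapM_ofChars ps hPre, hvals]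
    simp only [benum_mn length vs 0, benum_mx length vs 0, ← hWdef, ← hXdef]
    rw [getLastD_map_cast W _ hWne, getLastD_map_cast X _ hXne]
    rw [show PySem.Int.bor ((W.getLast hWne : Nat) : Int) 2
          = (((W.getLast hWne ||| 2 : Nat) : Nat) : Int) by
        have := PySem.Int.bor_natCast (W.getLast hWne) 2; simpa using this]
    rw [show PySem.Int.band ((X.getLast hXne : Nat) : Int) 254
          = (((X.getLast hXne &&& 254 : Nat) : Nat) : Int) by
        have := PySem.Int.band_natCast (X.getLast hXne) 254; simpa using this]
    rw [← List.map_dropLast, ← List.map_dropLast]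
    rw [show W.dropLast.map (fun w => ((w : Nat) : Int)) ++ [((W.getLast hWne ||| 2 : Nat) : Int)]
          = WF.map (fun w => ((w : Nat) : Int)) by rw [hWFdef]; simp]
    rw [show X.dropLast.map (fun w => ((w : Nat) : Int)) ++ [((X.getLast hXne &&& 254 : Nat) : Int)]
          = XF.map (fun w => ((w : Nat) : Int)) by rw [hXFdef]; simp]
    simp [List.map_map, Function.comp_def]
  rw [hA, hB]
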